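-- pv_equiv track=rewrite | github.com/mentatpsi/NutritionalGenomics | app.py | normalize_genotype
-- ===== SOURCE A (Python) =====
-- def normalize_genotype(genotype):
--     if genotype is None:
--         return ""
--
--     cleaned = str(genotype).upper().replace("/", "").replace(" ", "")
--     cleaned = "".join(ch for ch in cleaned if ch in {"A", "C", "G", "T"})
--
--     if not cleaned:
--         return ""
--
--     return "".join(sorted(cleaned))
-- ===== SOURCE B (Python) =====
-- def normalize_genotype(genotype):
--     if genotype is None:
--         return ""
--     cleaned = str(genotype).upper().replace("/", "").replace(" ", "")
--     a = c = g = t = 0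
--     for ch in cleaned:
--         if ch == "A":
--             a += 1
--         elif ch == "C":
--             c += 1
--         elif ch == "G":
--             g += 1
--         elif ch == "T":
--             t += 1
--     return "A" * a + "C" * c + "G" * g + "T" * t
-- ===== Notes on version B (the rewrite author's own statement) =====
-- stated objective: alternative
-- what changed: Replaced the filter-then-comparison-sort pipeline with a single counting pass that tallies A/C/G/T occurrences (ignoring other characters, which subsumes the filter) and rebuilds the result by concatenating each letter repeated by its count in fixed A,C,G,T order (a counting sort).
import Mathlib
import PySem

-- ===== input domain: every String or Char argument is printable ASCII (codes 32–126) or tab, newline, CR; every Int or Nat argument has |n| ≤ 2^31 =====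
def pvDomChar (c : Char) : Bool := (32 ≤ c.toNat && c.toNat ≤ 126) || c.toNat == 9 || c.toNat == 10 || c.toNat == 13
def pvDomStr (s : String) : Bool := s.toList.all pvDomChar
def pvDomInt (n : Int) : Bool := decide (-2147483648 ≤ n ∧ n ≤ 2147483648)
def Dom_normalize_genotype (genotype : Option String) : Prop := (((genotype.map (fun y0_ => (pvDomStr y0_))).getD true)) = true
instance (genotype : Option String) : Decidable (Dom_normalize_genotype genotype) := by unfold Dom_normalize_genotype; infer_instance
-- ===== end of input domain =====

-- B replaces filter+comparison-sort with a single counting pass over the cleaned string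
-- and rebuilds the output from the four tallies (counting sort over the ACGT alphabet).


-- ===== PORT A =====
def normalize_genotype (genotype : Option String) : String :=
  match genotype with
  | none => ""
  | some g =>
    let cleaned := PySem.Str.replace (PySem.Str.replace (PySem.Str.upper g) "/" "") " " ""
    let cleaned2 := String.ofList (cleaned.toList.filter
      (fun ch => ch == 'A' || ch == 'C' || ch == 'G' || ch == 'T'))
    if cleaned2.toList = [] then ""
    else String.ofList (PySem.List.sorted cleaned2.toList (fun x => x) false)

-- ===== PORT B =====
def pvCountStep (s : Nat × Nat × Nat × Nat) (ch : Char) : Nat × Nat × Nat × Nat :=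
  if ch == 'A' then (s.1 + 1, s.2.1, s.2.2.1, s.2.2.2)
  else if ch == 'C' then (s.1, s.2.1 + 1, s.2.2.1, s.2.2.2)
  else if ch == 'G' then (s.1, s.2.1, s.2.2.1 + 1, s.2.2.2)
  else if ch == 'T' then (s.1, s.2.1, s.2.2.1, s.2.2.2 + 1)
  else s

def normalize_genotype_alt (genotype : Option String) : String :=
  match genotype with
  | none => ""
  | some g =>
    let cleaned := PySem.Str.replace (PySem.Str.replace (PySem.Str.upper g) "/" "") " " ""
    let s := cleaned.toList.foldl pvCountStep (0, 0, 0, 0)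
    String.ofList (List.replicate s.1 'A' ++ List.replicate s.2.1 'C'
      ++ List.replicate s.2.2.1 'G' ++ List.replicate s.2.2.2 'T')

-- ===== PRECONDITION & SPEC =====
def Spec_normalize_genotype (genotype : Option String) (out : String) : Prop := out = normalize_genotype_alt genotype
instance (genotype : Option String) (out : String) : Decidable (Spec_normalize_genotype genotype out) := by unfold Spec_normalize_genotype; infer_instance

-- ===== CLAIM (what is proved, stated in full; the proofs are below) =====
def Claim_equal_normalize_genotype : Prop := ∀ (genotype : Option String), Dom_normalize_genotype genotype → Spec_normalize_genotype genotype (normalize_genotype genotype)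

-- ===== LEMMAS AND PROOFS =====

-- the counting fold computes the four letter counts
theorem pvCount_foldl (l : List Char) (a c g t : Nat) :
    l.foldl pvCountStep (a, c, g, t)
      = (a + l.count 'A', c + l.count 'C', g + l.count 'G', t + l.count 'T') := by
  induction l generalizing a c g t with
  | nil => simp
  | cons x xs ih =>
    by_cases hA : x = 'A'
    · subst hA; simp [pvCountStep, ih]; omega
    · by_cases hC : x = 'C'
      · subst hC; simp [pvCountStep, ih]; omega
      · by_cases hG : x = 'G'
        · subst hG; simp [pvCountStep, ih]; omega
        · by_cases hT : x = 'T'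
          · subst hT; simp [pvCountStep, ih]; omega
          · simp [pvCountStep, hA, hC, hG, hT, ih]

-- sorting the ACGT-filtered list is the same as laying out the counts in order
theorem pvSorted_filter (l : List Char) :
    PySem.List.sorted (l.filter (fun ch => ch == 'A' || ch == 'C' || ch == 'G' || ch == 'T'))
        (fun x => x) false
      = List.replicate (l.count 'A') 'A' ++ List.replicate (l.count 'C') 'C'
        ++ List.replicate (l.count 'G') 'G' ++ List.replicate (l.count 'T') 'T' := by
  set p : Char → Bool := fun ch => ch == 'A' || ch == 'C' || ch == 'G' || ch == 'T' with hp
  apply PySem.List.sorted_id_eq_of_perm_of_pairwise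
  · rw [List.perm_iff_count]
    intro x
    by_cases hx : p x = true
    · have hcf : (l.filter p).count x = l.count x := List.count_filter hx
      rcases (by simpa [hp] using hx : ((x = 'A' ∨ x = 'C') ∨ x = 'G') ∨ x = 'T') with ((h | h) | h) | h <;>
        subst h <;> simp [List.count_append, List.count_replicate, hcf]
    · have h1 : x ∉ l.filter p := fun hm => hx (List.of_mem_filter hm)
      have h2 : (l.filter p).count x = 0 := List.count_eq_zero.mpr h1
      have : x ≠ 'A' ∧ x ≠ 'C' ∧ x ≠ 'G' ∧ x ≠ 'T' := by
        refine ⟨?_, ?_, ?_, ?_⟩ <;> rintro rfl <;> simp [hp] at hx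
      simp [List.count_append, List.count_replicate, h2, Ne.symm this.1, Ne.symm this.2.1,
        Ne.symm this.2.2.1, Ne.symm this.2.2.2]
  · -- the concatenation of replicates is ≤-sorted
    have hrep : ∀ (n : Nat) (ch : Char), (List.replicate n ch).Pairwise (fun a b => a ≤ b) :=
      fun n ch => List.pairwise_replicate.2 (Or.inr le_rfl)
    have hmem : ∀ (n : Nat) (ch x : Char), x ∈ List.replicate n ch → x = ch :=
      fun n ch x hx => List.eq_of_mem_replicate hx
    refine (List.pairwise_append).2 ⟨?_, hrep _ _, ?_⟩
    · refine (List.pairwise_append).2 ⟨?_, hrep _ _, ?_⟩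
      · refine (List.pairwise_append).2 ⟨hrep _ _, hrep _ _, ?_⟩
        intro a ha b hb
        rw [hmem _ 'A' _ ha, hmem _ 'C' _ hb]; decide
      · intro a ha b hb
        rw [hmem _ 'G' _ hb]
        rcases List.mem_append.1 ha with h | h
        · rw [hmem _ 'A' _ h]; decide
        · rw [hmem _ 'C' _ h]; decide
    · intro a ha b hb
      rw [hmem _ 'T' _ hb]
      rcases List.mem_append.1 ha with h | h
      · rcases List.mem_append.1 h with h' | h'
        · rw [hmem _ 'A' _ h']; decide
        · rw [hmem _ 'C' _ h']; decide
      · rw [hmem _ 'G' _ h]; decide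

-- ===== VERDICT (by name: the statement is the Claim_ definition above) =====
theorem normalize_genotype_spec : Claim_equal_normalize_genotype := by
  intro genotype _
  unfold Spec_normalize_genotype normalize_genotype normalize_genotype_alt
  match genotype with
  | none => rfl
  | some g =>
    simp only [pvCount_foldl, Nat.zero_add, String.toList_ofList]
    by_cases h : (PySem.Str.replace (PySem.Str.replace (PySem.Str.upper g) "/" "") " " "").toList.filter
        (fun ch => ch == 'A' || ch == 'C' || ch == 'G' || ch == 'T') = []
    · have hc : ∀ ch, (ch == 'A' || ch == 'C' || ch == 'G' || ch == 'T') = true →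
          (PySem.Str.replace (PySem.Str.replace (PySem.Str.upper g) "/" "") " " "").toList.count ch = 0 := by
        intro ch hch
        have h0 := (List.count_filter
          (p := fun ch => ch == 'A' || ch == 'C' || ch == 'G' || ch == 'T')
          (l := (PySem.Str.replace (PySem.Str.replace (PySem.Str.upper g) "/" "") " " "").toList) hch).symm
        rw [h0, h]
        rfl
      rw [if_pos h, hc 'A' (by decide), hc 'C' (by decide), hc 'G' (by decide), hc 'T' (by decide)]
      rfl
    · rw [if_neg h, pvSorted_filter]
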